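-- pv_equiv track=rewrite | github.com/newkimjiwon/CodingTest | Programmers/PCCP/외톨이 알파벳.py | solution
-- ===== SOURCE A (Python) =====
-- def solution(input_string):
--     answer = ''
--
--     alpha = {chr(i + 97): 0 for i in range(26)}  # 알파벳
--
--     current = ''  # 현재 상태
--
--     for s in input_string:
--         if s != current:  # 다를 경우 갱신
--             current = s  # 현재 상태
--             alpha[s] += 1  # +1
--         else:
--             continue  # 전이랑 같으면 돌아감
--
--     # 결과
--     for i in alpha:
--         if alpha[i] >= 2:  # 2 이상인 알파벳 추가
--             answer += i
--
--     if answer == '':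
--         return 'N'
--     else:
--         return answer
-- ===== SOURCE B (Python) =====
-- def _lonely(c, s):
--     # c occurs in two separate groups iff the subsequence pattern appears in s:
--     # first c; then some different character; then c again
--     seen = False
--     gap = False
--     for ch in s:
--         if ch == c:
--             if gap:
--                 return True
--             seen = True
--         else:
--             if seen:
--                 gap = True
--     return False
--
--
-- def solution(input_string):
--     # tally the letters once, then run the pattern scan only for letters present
--     counts = {c: 0 for c in map(chr, range(97, 123))}
--     for ch in input_string:
--         counts[ch] += 1
--     answer = ''.join(c for c in counts if counts[c] and _lonely(c, input_string))
--     return answer or 'N'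
-- ===== Notes on version B (the rewrite author's own statement) =====
-- stated objective: alternative
-- what changed: B drops run compression entirely: after a plain one-pass letter tally used only to skip absent letters, it searches the string per letter with an early-exit two-flag scan for a three-term subsequence pattern (the letter; then a different character; then the letter again), which occurs iff the letter lies in at least two separate groups, instead of A's single stateful pass that collapses runs into a 26-key count dict and thresholds at 2.
import Mathlib
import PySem

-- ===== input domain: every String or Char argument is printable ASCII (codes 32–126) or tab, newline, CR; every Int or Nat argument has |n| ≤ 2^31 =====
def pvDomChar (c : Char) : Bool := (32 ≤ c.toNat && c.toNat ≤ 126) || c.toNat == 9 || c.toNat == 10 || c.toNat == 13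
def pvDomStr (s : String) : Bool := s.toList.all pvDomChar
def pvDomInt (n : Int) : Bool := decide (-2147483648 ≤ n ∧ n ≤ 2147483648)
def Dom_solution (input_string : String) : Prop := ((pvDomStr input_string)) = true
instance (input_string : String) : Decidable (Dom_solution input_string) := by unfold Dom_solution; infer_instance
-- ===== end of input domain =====

-- B replaces A's run-compressing transition count with a plain letter tally followed, for
-- each letter present, by an early-exit scan for a three-term subsequence pattern -- the letter; a
-- different character; the letter again (no run detection, no threshold count); objective: alternative.

-- ===== PORT A =====
-- the dict comprehension {chr(i + 97): 0 for i in range(26)}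
def pvAlpha0 : PySem.Dict Char Int :=
  (PySem.List.pyRange 0 26 1).foldl
    (fun d i => d.insert (Char.ofNat (i.toNat + 97)) 0) PySem.Dict.empty

def solution (input_string : String) : String :=
  let st := input_string.toList.foldl
    (fun (st : List Char × PySem.Dict Char Int) s =>
      if [s] ≠ st.1 then ([s], st.2.modify s 0 (· + 1)) else st)
    (([] : List Char), pvAlpha0)
  let answer := st.2.keys.foldl
    (fun ans i => if 2 ≤ st.2.getD i 0 then ans ++ [i] else ans) ([] : List Char)
  if answer = [] then "N" else String.ofList answer

-- ===== PORT B =====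
-- _lonely's for-loop with the two mutable flags and its early 'return True', as structural
-- recursion carrying the flags
def pvLonelyGo (c : Char) : List Char → Bool → Bool → Bool
  | [], _, _ => false
  | ch :: t, seen, gap =>
    if ch = c then
      (if gap then true else pvLonelyGo c t true gap)
    else
      pvLonelyGo c t seen (if seen then true else gap)

def pvLonely (c : Char) (s : List Char) : Bool := pvLonelyGo c s false false

def solution_alt (input_string : String) : String :=
  let counts := input_string.toList.foldl (fun d ch => d.modify ch 0 (· + 1)) pvAlpha0
  -- ''.join(c for c in counts if counts[c] and _lonely(c, input_string)); counts[c] is a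
  -- plain key lookup on a key the comprehension iterates over, so getD is exact here
  let answer := String.ofList (counts.keys.filter
    (fun c => !(counts.getD c 0 == 0) && pvLonely c input_string.toList))
  if answer = "" then "N" else answer

-- ===== PRECONDITION & SPEC =====
-- Pre_ excludes exactly the inputs containing a non-lowercase-letter character: A raises
-- KeyError there (its counting dict has only the 26 lowercase keys), so A returns on no
-- excluded input.
def Pre_solution (input_string : String) : Prop :=
  (input_string.toList.all (fun c => 97 ≤ c.toNat && c.toNat ≤ 122)) = true
instance (input_string : String) : Decidable (Pre_solution input_string) := by
  unfold Pre_solution; infer_instance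

def pvWitness_solution : String := "edeaaabbccd"

def Spec_solution (input_string : String) (out : String) : Prop := out = solution_alt input_string
instance (input_string : String) (out : String) : Decidable (Spec_solution input_string out) := by unfold Spec_solution; infer_instance

-- ===== CLAIM (what is proved, stated in full; the proofs are below) =====
def Claim_equal_solution : Prop := ∀ (input_string : String), Dom_solution input_string → Pre_solution input_string → Spec_solution input_string (solution input_string)

-- ===== LEMMAS AND PROOFS =====

-- the run representatives of l given the previous "current" state ([] is Python's current = '')
def pvDD (cur : List Char) : List Char → List Char
  | [] => []
  | s :: t => if [s] ≠ cur then s :: pvDD [s] t else pvDD cur t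

def pvAbc : List Char :=
  ['a','b','c','d','e','f','g','h','i','j','k','l','m','n','o','p','q','r','s','t','u','v','w','x','y','z']

lemma pvDD_subset {c : Char} : ∀ (cur l : List Char), c ∈ pvDD cur l → c ∈ l := by
  intro cur l
  induction l generalizing cur with
  | nil => simp [pvDD]
  | cons s t ih =>
    simp only [pvDD]
    split
    · intro h
      rcases List.mem_cons.mp h with h | h
      · simp [h]
      · exact List.mem_cons_of_mem _ (ih _ h)
    · intro h; exact List.mem_cons_of_mem _ (ih _ h)

-- A's loop: the dict component only depends on the run representatives
lemma pv_foldA (l : List Char) : ∀ (cur : List Char) (d : PySem.Dict Char Int),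
    (l.foldl (fun (st : List Char × PySem.Dict Char Int) s =>
        if [s] ≠ st.1 then ([s], st.2.modify s 0 (· + 1)) else st) (cur, d)).2
      = (pvDD cur l).foldl (fun d c => d.modify c 0 (· + 1)) d := by
  induction l with
  | nil => intro cur d; simp [pvDD]
  | cons s t ih =>
    intro cur d
    simp only [List.foldl_cons, pvDD]
    by_cases h : [s] ≠ cur
    · simp only [if_pos h, List.foldl_cons]; exact ih _ _
    · simp only [if_neg h]; exact ih _ _

lemma pv_mem_abc {c : Char} (h1 : 97 ≤ c.toNat) (h2 : c.toNat ≤ 122) : c ∈ pvAbc := by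
  have hv : Char.ofNat c.toNat = c := Char.ofNat_toNat c
  interval_cases h : c.toNat <;> (rw [← hv]; decide)

lemma pvAlpha0_keys : pvAlpha0.keys = pvAbc := by decide

lemma pvAlpha0_getD {c : Char} (h : c ∈ pvAbc) : pvAlpha0.getD c 0 = 0 := by
  fin_cases h <;> decide

-- the coupled invariant: B's early-exit flag scan, started in the state reached after a
-- prefix that entered r runs of c and left A's "current" at cur, decides 2 ≤ total run count
lemma pv_main (c : Char) : ∀ (l cur : List Char) (r : Nat), r ≤ 1 → (cur = [c] → 1 ≤ r) →
    pvLonelyGo c l (decide (1 ≤ r)) (decide (1 ≤ r ∧ cur ≠ [c]))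
      = decide (2 ≤ r + (pvDD cur l).count c) := by
  intro l
  induction l with
  | nil => intro cur r hr _; simp [pvLonelyGo, pvDD]; omega
  | cons ch t ih =>
    intro cur r hr hcur
    by_cases hc : ch = c
    · subst hc
      by_cases h : cur = [ch]
      · have hr1 : r = 1 := le_antisymm hr (hcur h)
        subst hr1
        have hdd : pvDD cur (ch :: t) = pvDD cur t := by
          simp [pvDD, h]
        rw [hdd]
        have : pvLonelyGo ch (ch :: t) (decide (1 ≤ 1)) (decide (1 ≤ 1 ∧ cur ≠ [ch])) =
            pvLonelyGo ch t true false := by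
          simp [pvLonelyGo, h]
        rw [this]
        have := ih cur 1 le_rfl (fun _ => le_rfl)
        simpa [h] using this
      · have hne : ([ch] : List Char) ≠ cur := fun hx => h hx.symm
        have hdd : pvDD cur (ch :: t) = ch :: pvDD [ch] t := by
          simp [pvDD, hne]
        rw [hdd]
        rcases Nat.le_one_iff_eq_zero_or_eq_one.mp hr with h0 | h1
        · subst h0
          have hgo : pvLonelyGo ch (ch :: t) (decide (1 ≤ 0)) (decide (1 ≤ 0 ∧ cur ≠ [ch])) =
              pvLonelyGo ch t true false := by
            simp [pvLonelyGo]
          have hih : pvLonelyGo ch t true false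
              = decide (2 ≤ 1 + List.count ch (pvDD [ch] t)) := by
            simpa using ih [ch] 1 le_rfl (fun _ => le_rfl)
          rw [hgo, List.count_cons_self, hih, decide_eq_decide]
          omega
        · subst h1
          have : pvLonelyGo ch (ch :: t) (decide (1 ≤ 1)) (decide (1 ≤ 1 ∧ cur ≠ [ch])) = true := by
            simp [pvLonelyGo, h]
          rw [this]
          simp only [List.count_cons_self]
          have : 2 ≤ 1 + (((pvDD [ch] t).count ch) + 1) := by omega
          simp [this]
    · have hcount : ∀ m : List Char, (ch :: m).count c = m.count c := by
        intro m; simp [hc]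
      have hlhs : pvLonelyGo c (ch :: t) (decide (1 ≤ r)) (decide (1 ≤ r ∧ cur ≠ [c]))
          = pvLonelyGo c t (decide (1 ≤ r)) (decide (1 ≤ r)) := by
        rcases Nat.le_one_iff_eq_zero_or_eq_one.mp hr with h0 | h1
        · subst h0; simp [pvLonelyGo, hc]
        · subst h1; simp [pvLonelyGo, hc]
      have hcurne : [ch] ≠ [c] := by simpa using hc
      by_cases h : [ch] ≠ cur
      · have hdd : pvDD cur (ch :: t) = ch :: pvDD [ch] t := by simp [pvDD, h]
        rw [hdd, hcount, hlhs]
        have := ih [ch] r hr (fun hx => absurd hx.symm (by simpa [eq_comm] using hc))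
        simpa [hcurne] using this
      · push_neg at h
        have hdd : pvDD cur (ch :: t) = pvDD cur t := by simp [pvDD, h]
        rw [hdd, hlhs]
        have hcur' : cur ≠ [c] := by rw [← h]; exact hcurne
        have := ih cur r hr (fun hx => absurd hx hcur')
        simpa [hcur'] using this

lemma pv_lonely_iff (c : Char) (l : List Char) :
    pvLonely c l = decide (2 ≤ (pvDD [] l).count c) := by
  have := pv_main c l [] 0 (by omega) (by simp)
  simpa [pvLonely] using this

-- ===== VERDICT (by name: the statement is the Claim_ definition above) =====
theorem solution_spec : Claim_equal_solution := by
  intro s _ hpre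
  unfold Spec_solution solution solution_alt
  unfold Pre_solution at hpre
  generalize hgen : s.toList = l
  rw [hgen] at hpre
  rw [List.all_eq_true] at hpre
  have hpre' : ∀ c ∈ l, 97 ≤ c.toNat ∧ c.toNat ≤ 122 := fun c hc => by
    simpa using hpre c hc
  have habc : ∀ c ∈ l, c ∈ pvAbc := fun c hc =>
    pv_mem_abc (hpre' c hc).1 (hpre' c hc).2
  have hkeys : ∀ m : List Char, (∀ c ∈ m, c ∈ pvAbc) →
      (m.foldl (fun d c => d.modify c 0 (· + 1)) pvAlpha0).keys = pvAbc := by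
    intro m hm
    rw [PySem.Dict.keys_foldl_modify, pvAlpha0_keys, PySem.Set.update_eq_append_filter]
    have hnil : (PySem.Set.ofList m).filter
        (fun y => !(PySem.Set.contains pvAbc y)) = [] := by
      rw [List.filter_eq_nil_iff]
      intro c hc
      have hm' : c ∈ pvAbc := hm c ((PySem.Set.mem_ofList _ _).mp hc)
      simp [PySem.Set.contains, hm']
    rw [hnil, List.append_nil]
  have hkeysA := hkeys (pvDD [] l) (fun c hc => habc c (pvDD_subset _ _ hc))
  have hkeysB := hkeys l habc
  simp only [pv_foldA, hkeysA, hkeysB]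
  rw [PySem.List.foldl_append_ite_eq_filter, List.nil_append]
  have hfilter : pvAbc.filter
        (fun i => decide (2 ≤ ((pvDD [] l).foldl (fun d c => d.modify c 0 (· + 1)) pvAlpha0).getD i 0))
      = pvAbc.filter
        (fun c => !((l.foldl (fun d ch => d.modify ch 0 (· + 1)) pvAlpha0).getD c 0 == 0)
          && pvLonely c l) := by
    apply List.filter_congr
    intro c hc
    rw [PySem.Dict.getD_foldl_modify_add_one, PySem.Dict.getD_foldl_modify_add_one,
      pvAlpha0_getD hc, pv_lonely_iff]
    by_cases h2 : 2 ≤ (pvDD [] l).count c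
    · have hpos : 0 < List.count c (pvDD [] l) := by omega
      have hcl : c ∈ l := pvDD_subset _ _ (List.count_pos_iff.mp hpos)
      have h1 : 0 < l.count c := List.count_pos_iff.mpr hcl
      have e1 : ((0 : Int) + (l.count c : Int) == 0) = false := by
        rw [beq_eq_false_iff_ne]
        push_cast
        omega
      have e2 : decide (2 ≤ (0 : Int) + ((pvDD [] l).count c : Int)) = true := by
        rw [decide_eq_true_eq]
        push_cast
        omega
      simp [e1, e2, h2]
      omega
    · have e2 : decide (2 ≤ (0 : Int) + ((pvDD [] l).count c : Int)) = false := by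
        rw [decide_eq_false_iff_not]
        push_cast
        omega
      simp [e2, h2]
  rw [hfilter]
  generalize pvAbc.filter _ = ans
  by_cases he : ans = []
  · simp [he]
  · simp [he]
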